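-- pv_equiv track=rewrite | github.com/daoyou-zhang/daoyoucode | backend/daoyoucode/agents/tools/postprocessor.py | _parse_repo_map
-- ===== SOURCE A (Python) =====
-- from typing import Dict, Any, List, Optional
--
-- def _parse_repo_map(content: str) -> List[tuple]:
--     """
--     解析RepoMap内容
--
--     Returns:
--         [(file_header, file_content), ...]
--     """
--     files = []
--     lines = content.splitlines()
--
--     current_file = None
--     current_content = []
--
--     for line in lines:
--         # 文件头（包含冒号）
--         if ':' in line and not line.startswith('  '):
--             if current_file:
--                 files.append((current_file, '\n'.join(current_content)))
--             current_file = line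
--             current_content = []
--         else:
--             current_content.append(line)
--
--     # 添加最后一个文件
--     if current_file:
--         files.append((current_file, '\n'.join(current_content)))
--
--     return files
-- ===== SOURCE B (Python) =====
-- def _parse_repo_map(content: str) -> list:
--     """Parse repo map into (file_header, file_content) pairs.
--
--     Right-to-left pass: walk the lines backwards, collecting pending content
--     lines; on a header line emit (header, joined pending) at the front of the
--     result and reset. No current-header state and no trailing flush needed;
--     lines before the first header end up as leftover pending and are dropped.
--     """
--     files = []
--     pending = []
--     for line in reversed(content.splitlines()):
--         if ':' in line and not line.startswith('  '):
--             files = [(line, '\n'.join(pending))] + files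
--             pending = []
--         else:
--             pending = [line] + pending
--     return files
-- ===== Notes on version B (the rewrite author's own statement) =====
-- stated objective: alternative
-- what changed: Replaces A's forward pass with current-header state and a trailing flush by a right-to-left fold that collects pending content lines and emits a (header, content) pair the moment a header is met, building the output back-to-front with no mutable current-file state and no post-loop flush.
import Mathlib
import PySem

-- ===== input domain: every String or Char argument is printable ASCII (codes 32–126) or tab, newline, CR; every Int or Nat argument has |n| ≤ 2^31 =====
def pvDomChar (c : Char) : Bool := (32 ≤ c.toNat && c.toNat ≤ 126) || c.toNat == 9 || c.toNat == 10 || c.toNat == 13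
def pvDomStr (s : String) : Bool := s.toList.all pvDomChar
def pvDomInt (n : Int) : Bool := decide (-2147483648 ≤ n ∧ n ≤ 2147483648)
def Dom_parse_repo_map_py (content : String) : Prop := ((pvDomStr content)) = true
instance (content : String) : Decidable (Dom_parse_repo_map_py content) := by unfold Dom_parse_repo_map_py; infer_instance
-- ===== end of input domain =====

-- B replaces A's forward accumulator (current-header state + trailing flush) by a
-- right-to-left fold emitting pairs back-to-front; objective: alternative decomposition.

-- ===== PORT A =====
-- header test: ':' in line and not line.startswith('  ')
def pvIsHeader (line : String) : Bool :=
  PySem.Str.isIn ":" line && !(PySem.Str.startswith line "  ")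

-- loop body of A: state = (files, current_file, current_content)
def pvAStep (st : List (String × String) × Option String × List String) (line : String) :
    List (String × String) × Option String × List String :=
  if pvIsHeader line then
    match st.2.1 with
    | some h => (st.1 ++ [(h, PySem.Str.join "\n" st.2.2)], some line, [])
    | none   => (st.1, some line, [])
  else
    (st.1, st.2.1, st.2.2 ++ [line])

def parse_repo_map_py (content : String) : List (String × String) :=
  let st := (PySem.Str.splitlines content).foldl pvAStep ([], none, [])
  match st.2.1 with
  | some h => st.1 ++ [(h, PySem.Str.join "\n" st.2.2)]
  | none   => st.1

-- ===== PORT B =====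
-- loop body of B (lines taken right-to-left): state = (files, pending)
def pvBStep (line : String) (st : List (String × String) × List String) :
    List (String × String) × List String :=
  if pvIsHeader line then
    ((line, PySem.Str.join "\n" st.2) :: st.1, [])
  else
    (st.1, line :: st.2)

def parse_repo_map_py_alt (content : String) : List (String × String) :=
  ((PySem.Str.splitlines content).foldr pvBStep ([], [])).1

-- ===== PRECONDITION & SPEC =====
def Spec_parse_repo_map_py (content : String) (out : List (String × String)) : Prop := out = parse_repo_map_py_alt content
instance (content : String) (out : List (String × String)) : Decidable (Spec_parse_repo_map_py content out) := by unfold Spec_parse_repo_map_py; infer_instance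

-- ===== CLAIM (what is proved, stated in full; the proofs are below) =====
def Claim_equal_parse_repo_map_py : Prop := ∀ (content : String), Dom_parse_repo_map_py content → Spec_parse_repo_map_py content (parse_repo_map_py content)

-- ===== LEMMAS AND PROOFS =====

-- A's post-loop flush, as a function of the final state
def pvAFin (st : List (String × String) × Option String × List String) : List (String × String) :=
  match st.2.1 with
  | some h => st.1 ++ [(h, PySem.Str.join "\n" st.2.2)]
  | none   => st.1

-- key invariant: A's run from any state equals B's foldr result, with the
-- current header (if any) absorbing its collected lines plus B's leftover pending
lemma pv_run_eq (ls : List String) (fs : List (String × String)) (cur : Option String) (cc : List String) :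
    pvAFin (ls.foldl pvAStep (fs, cur, cc)) =
      match cur with
      | none   => fs ++ (ls.foldr pvBStep ([], [])).1
      | some h => fs ++ (h, PySem.Str.join "\n" (cc ++ (ls.foldr pvBStep ([], [])).2)) :: (ls.foldr pvBStep ([], [])).1 := by
  induction ls generalizing fs cur cc with
  | nil =>
    cases cur <;> simp [pvAFin]
  | cons l ls ih =>
    simp only [List.foldl_cons, List.foldr_cons, pvAStep, pvBStep]
    by_cases hl : pvIsHeader l <;> cases cur <;> simp [hl, ih]

-- ===== VERDICT (by name: the statement is the Claim_ definition above) =====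
theorem parse_repo_map_py_spec : Claim_equal_parse_repo_map_py := by
  intro content _
  show parse_repo_map_py content = parse_repo_map_py_alt content
  have := pv_run_eq (PySem.Str.splitlines content) [] none []
  simpa [parse_repo_map_py, parse_repo_map_py_alt, pvAFin] using this
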